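-- pv_equiv track=rewrite | github.com/mishakras/pythontrainning | homework2/task5.py | custom_range
-- ===== SOURCE A (Python) =====
-- from typing import List, Any, Sequence
--
-- def custom_range(it: Sequence, start: Any = None, end: Any = None, step: int = 1) -> List:
--     flag = False
--     final = []
--     if step == 0:
--         final.append("Error, step must not be 0")
--         return final
--     if step < 0:
--         it = reversed(it)
--         step = -step
--     k = step
--     if start is None:
--         flag = True
--     for i in it:
--         if start is not None and start == i:
--             flag = True
--         if end is not None and end == i:
--             flag = False
--         if flag:
--             if k == step:
--                 final.append(i)
--                 k = 1
--             else:
--                 k += 1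
--     return final
-- ===== SOURCE B (Python) =====
-- def custom_range(it, start=None, end=None, step=1):
--     if step == 0:
--         return ["Error, step must not be 0"]
--     seq = list(it)
--     if step < 0:
--         seq.reverse()
--     on, acc = start is None, []
--     for i in seq:
--         on = (on or (start is not None and i == start)) and not (end is not None and i == end)
--         if on:
--             acc.append(i)
--     return [x for j, x in enumerate(acc) if j % abs(step) == 0]
-- ===== Notes on version B (the rewrite author's own statement) =====
-- stated objective: alternative
-- what changed: Replaces A's single interleaved loop carrying a flag and a wrap-around counter k by a fold that only toggles the flag (one boolean formula) while collecting the active elements, then a separate index-modulus comprehension (enumerate, j % abs(step) == 0) that selects every step-th active element.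
import Mathlib
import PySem

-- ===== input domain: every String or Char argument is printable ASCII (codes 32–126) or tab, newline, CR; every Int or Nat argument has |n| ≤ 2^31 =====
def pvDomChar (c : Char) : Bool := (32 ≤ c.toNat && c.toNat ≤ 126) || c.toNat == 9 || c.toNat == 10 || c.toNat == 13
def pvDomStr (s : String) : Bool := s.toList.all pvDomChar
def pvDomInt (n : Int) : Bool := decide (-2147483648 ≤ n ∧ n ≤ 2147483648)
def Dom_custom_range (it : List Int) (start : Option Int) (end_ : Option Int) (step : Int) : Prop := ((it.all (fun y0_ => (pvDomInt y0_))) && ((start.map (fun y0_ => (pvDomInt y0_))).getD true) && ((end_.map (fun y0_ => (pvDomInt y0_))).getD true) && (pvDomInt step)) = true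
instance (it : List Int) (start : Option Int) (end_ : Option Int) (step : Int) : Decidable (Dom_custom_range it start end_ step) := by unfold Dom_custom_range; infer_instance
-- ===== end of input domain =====

-- B replaces A's interleaved flag/counter recursion by a fold collecting the active
-- elements followed by an index-modulus comprehension (objective: alternative decomposition).

-- ===== PORT A =====
-- A's for-loop: state (flag, k), appending to `final`; transcribed as structural
-- recursion building the result front-to-back in the same order A appends.
def pvALoop (start end_ : Option Int) (step : Int) : List Int → Bool → Int → List Int
  | [], _, _ => []
  | i :: rest, flag, k =>
    let flag1 := if start.isSome && start == some i then true else flag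
    let flag2 := if end_.isSome && end_ == some i then false else flag1
    if flag2 then
      if k == step then i :: pvALoop start end_ step rest flag2 1
      else pvALoop start end_ step rest flag2 (k + 1)
    else pvALoop start end_ step rest flag2 k

def custom_range (it : List Int) (start : Option Int) (end_ : Option Int) (step : Int) : List Int :=
  -- step == 0: Python A returns ["Error, step must not be 0"], a string not of the
  -- declared List[int] type; Pre_ excludes it, the port returns [] there.
  if step == 0 then []
  else
    let it' := if step < 0 then it.reverse else it
    let step' := if step < 0 then -step else step
    pvALoop start end_ step' it' start.isNone step'

-- ===== PORT B =====
def custom_range_alt (it : List Int) (start : Option Int) (end_ : Option Int) (step : Int) : List Int :=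
  -- step == 0: Source B returns the same error string, not of the declared type; outside Pre_.
  if step == 0 then []
  else
    let seq := if step < 0 then it.reverse else it
    let p := seq.foldl
      (fun (st : Bool × List Int) i =>
        let on := (st.1 || (start.isSome && start == some i)) && !(end_.isSome && end_ == some i)
        (on, if on then st.2 ++ [i] else st.2))
      (start.isNone, ([] : List Int))
    ((PySem.List.enumerate p.2 0).filter
      (fun q => PySem.Int.mod q.1 (step.natAbs : Int) == 0)).map (·.2)

-- ===== PRECONDITION & SPEC =====
-- Pre_ excludes step = 0, where both Pythons return a one-element LIST OF STRING
-- ("Error, step must not be 0"), which is not a value of the declared List[int] type.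
def Pre_custom_range (it : List Int) (start : Option Int) (end_ : Option Int) (step : Int) : Prop := step ≠ 0
instance (it : List Int) (start : Option Int) (end_ : Option Int) (step : Int) : Decidable (Pre_custom_range it start end_ step) := by unfold Pre_custom_range; infer_instance
def pvWitness_custom_range : List Int × Option Int × Option Int × Int := ([1, 2, 3, 4], some 2, none, 1)

def Spec_custom_range (it : List Int) (start : Option Int) (end_ : Option Int) (step : Int) (out : List Int) : Prop := out = custom_range_alt it start end_ step
instance (it : List Int) (start : Option Int) (end_ : Option Int) (step : Int) (out : List Int) : Decidable (Spec_custom_range it start end_ step out) := by unfold Spec_custom_range; infer_instance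

-- ===== CLAIM =====
def Claim_equal_custom_range : Prop := ∀ (it : List Int) (start : Option Int) (end_ : Option Int) (step : Int), Dom_custom_range it start end_ step → Pre_custom_range it start end_ step → Spec_custom_range it start end_ step (custom_range it start end_ step)

-- ===== LEMMAS AND PROOFS =====

-- proof-side helper: the active (marker-filtered) stream, with A's two-if flag update
def pvActive (start end_ : Option Int) : List Int → Bool → List Int
  | [], _ => []
  | i :: rest, on =>
    let on1 := if start.isSome && start == some i then true else on
    let on2 := if end_.isSome && end_ == some i then false else on1
    if on2 then i :: pvActive start end_ rest on2 else pvActive start end_ rest on2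

-- proof-side helper: A's counter applied to a plain list
def pvStridedK (step k : Int) : List Int → List Int
  | [] => []
  | x :: xs => if k == step then x :: pvStridedK step 1 xs else pvStridedK step (k + 1) xs

-- A's loop = counter applied to the active stream
theorem aLoop_eq_stridedK (start end_ : Option Int) (step : Int) :
    ∀ (l : List Int) (flag : Bool) (k : Int),
      pvALoop start end_ step l flag k = pvStridedK step k (pvActive start end_ l flag) := by
  intro l
  induction l with
  | nil => intro flag k; simp [pvALoop, pvActive, pvStridedK]
  | cons i rest ih =>
    intro flag k
    simp only [pvALoop, pvActive]
    set flag2 := (if end_.isSome && end_ == some i then false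
      else if start.isSome && start == some i then true else flag) with hf
    by_cases h : flag2 = true
    · simp only [h, if_true]
      by_cases hk : (k == step) = true
      · rw [ih]
        conv_rhs => rw [pvStridedK.eq_2]
        simp [hk]
      · conv_rhs => rw [pvStridedK.eq_2]
        simp only [Bool.not_eq_true] at hk
        simp only [hk, Bool.false_eq_true, if_false]
        exact ih true (k + 1)
    · simp only [Bool.not_eq_true] at h
      simp [h, ih]

-- B's fold collects exactly the active stream (flag formula = A's two-if update)
theorem fold_eq_active (start end_ : Option Int) :
    ∀ (l : List Int) (on : Bool) (acc : List Int),
      (l.foldl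
        (fun (st : Bool × List Int) i =>
          let on := (st.1 || (start.isSome && start == some i)) && !(end_.isSome && end_ == some i)
          (on, if on then st.2 ++ [i] else st.2))
        (on, acc)).2 = acc ++ pvActive start end_ l on := by
  intro l
  induction l with
  | nil => intro on acc; simp [pvActive]
  | cons i rest ih =>
    intro on acc
    have hflag : ((on || (start.isSome && start == some i)) && !(end_.isSome && end_ == some i))
        = (if end_.isSome && end_ == some i then false
           else if start.isSome && start == some i then true else on) := by
      cases h1 : (start.isSome && start == some i) <;> cases h2 : (end_.isSome && end_ == some i) <;> simp
    simp only [List.foldl_cons, pvActive]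
    rw [hflag]
    set on2 := (if end_.isSome && end_ == some i then false
      else if start.isSome && start == some i then true else on) with ho
    cases h : on2 with
    | true => simp only [if_true, ih, List.append_assoc]; rfl
    | false => simp only [Bool.false_eq_true, if_false, ih]

-- head-index residue: adding 0 < d < step changes the residue mod step
theorem emod_add_ne (stp n d : Int) (hd1 : 0 < d) (hd2 : d < stp) :
    (n + d) % stp ≠ n % stp := by
  intro h
  have hm : Int.ModEq stp (n + d) n := h
  have hdvd : stp ∣ n - (n + d) := Int.ModEq.dvd hm
  have hdvd' : stp ∣ d := by
    have : n - (n + d) = -d := by ring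
    rw [this] at hdvd
    exact (dvd_neg).mp hdvd
  have := Int.le_of_dvd hd1 hdvd'
  omega

-- the counter = an index-modulus filter over the enumeration
theorem stridedK_eq_filter (stp : Int) (hs : 1 ≤ stp) :
    ∀ (xs : List Int) (n k r : Int), 1 ≤ k → k ≤ stp →
      PySem.Int.mod (n + stp - k) stp = r →
      pvStridedK stp k xs =
        ((PySem.List.enumerate xs n).filter
          (fun q => PySem.Int.mod q.1 stp == r)).map (·.2) := by
  intro xs
  induction xs with
  | nil => intro n k r _ _ _; simp [pvStridedK, PySem.List.enumerate_nil]
  | cons x rest ih =>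
    intro n k r h1 h2 hr
    have hpos : (0 : Int) < stp := by omega
    rw [pvStridedK.eq_2, PySem.List.enumerate_cons, List.filter_cons]
    by_cases hk : k = stp
    · subst hk
      have hrn : PySem.Int.mod n k = r := by
        rw [show n + k - k = n from by ring] at hr; exact hr
      have hhead : (PySem.Int.mod n k == r) = true := by simp [hrn]
      simp only [beq_self_eq_true, hhead, if_true, List.map_cons]
      have hnext : PySem.Int.mod ((n + 1) + k - 1) k = r := by
        rw [show (n + 1) + k - 1 = n + k from by ring,
            PySem.Int.mod_eq_emod_of_pos hpos, Int.add_emod_right,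
            ← PySem.Int.mod_eq_emod_of_pos hpos]
        exact hrn
      rw [ih (n + 1) 1 r le_rfl hs hnext]
    · have hne : (k == stp) = false := by simp [hk]
      have hhead : (PySem.Int.mod n stp == r) = false := by
        rw [← hr, PySem.Int.mod_eq_emod_of_pos hpos, PySem.Int.mod_eq_emod_of_pos hpos]
        simp only [beq_eq_false_iff_ne, ne_eq]
        rw [show n + stp - k = n + (stp - k) from by ring]
        exact fun h => emod_add_ne stp n (stp - k) (by omega) (by omega) h.symm
      simp only [hne, Bool.false_eq_true, if_false, hhead]
      exact ih (n + 1) (k + 1) r (by omega) (by omega)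
        (by rw [show (n + 1) + stp - (k + 1) = n + stp - k from by ring]; exact hr)

-- ===== VERDICT =====
theorem custom_range_spec : Claim_equal_custom_range := by
  intro it start end_ step _ hpre
  unfold Spec_custom_range custom_range custom_range_alt Pre_custom_range at *
  have hz : (step == 0) = false := by simp [hpre]
  simp only [hz, Bool.false_eq_true, if_false]
  have hs1 : (1 : Int) ≤ (step.natAbs : Int) := by omega
  have hstep' : (if step < 0 then -step else step) = (step.natAbs : Int) := by
    split_ifs with h <;> omega
  rw [hstep', aLoop_eq_stridedK, fold_eq_active, List.nil_append,
      stridedK_eq_filter (step.natAbs : Int) hs1 _ 0 (step.natAbs : Int) 0 hs1 le_rfl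
        (by rw [show (0 : Int) + (step.natAbs : Int) - (step.natAbs : Int) = 0 from by ring,
                PySem.Int.mod_eq_emod_of_pos (by omega)]
            simp)]
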